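-- pv_equiv track=rewrite | github.com/jan-klos/dmn_python | DMNVisualisation.py | break_name
-- ===== SOURCE A (Python) =====
-- def break_name(name, length = 9):
--     n = 0
--     result = name
--     for i in range(0, len(name)):
--         if name[i] != ' ':
--             n += 1
--         elif n > length:
--             result = result[:i] + '\n' + result[i + 1:]
--             n = 0
--         else:
--             n += 1
--     return result
-- ===== SOURCE B (Python) =====
-- def break_name(name, length=9):
--     result = name
--     start = 0
--     while True:
--         j = name.find(' ', max(start + length + 1, start))
--         if j == -1:
--             break
--         result = result[:j] + '\n' + result[j + 1:]
--         start = j + 1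
--     return result
-- ===== Notes on version B (the rewrite author's own statement) =====
-- stated objective: alternative
-- what changed: B replaces A's per-character scan with a running counter by a cursor that repeatedly jumps straight to the next space at or beyond start+length+1 via str.find and splices a newline there.
import Mathlib
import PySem

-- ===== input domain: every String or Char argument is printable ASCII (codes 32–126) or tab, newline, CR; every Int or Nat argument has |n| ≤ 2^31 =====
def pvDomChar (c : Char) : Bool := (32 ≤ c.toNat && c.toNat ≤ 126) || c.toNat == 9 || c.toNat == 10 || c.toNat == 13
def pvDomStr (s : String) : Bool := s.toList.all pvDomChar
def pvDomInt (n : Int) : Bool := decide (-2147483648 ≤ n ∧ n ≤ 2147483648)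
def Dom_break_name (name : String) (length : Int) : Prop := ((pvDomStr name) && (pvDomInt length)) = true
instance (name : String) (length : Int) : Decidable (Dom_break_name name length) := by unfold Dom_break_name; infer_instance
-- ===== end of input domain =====

-- B replaces A's per-character counter scan by a cursor jumping to the next space at or
-- beyond start+length+1 with str.find (objective: alternative algorithm, same result).


-- ===== PORT A =====
-- A's `for i in range(0, len(name))` as the obvious index recursion carrying the same
-- state (n, result); name[i] is in range for every visited i, so cs[i] is exact.
def pvALoop (cs : List Char) (length : Int) (i : Nat) (n : Int) (result : List Char) :
    List Char :=
  if h : i < cs.length then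
    if cs[i] ≠ ' ' then
      pvALoop cs length (i + 1) (n + 1) result
    else if n > length then
      pvALoop cs length (i + 1) 0
        (PySem.List.slice result none (some (i : Int)) ++
          '\n' :: PySem.List.slice result (some ((i : Int) + 1)) none)
    else
      pvALoop cs length (i + 1) (n + 1) result
  else result
termination_by cs.length - i

def break_name (name : String) (length : Int) : String :=
  String.mk (pvALoop name.toList length 0 0 name.toList)

-- ===== PORT B =====
-- termination facts about str.find, cited by pvBLoop's decreasing_by
theorem pvFind_past (cs : List Char) (m : Int) (h : (cs.length : Int) < m) :
    PySem.Chars.findFrom cs [' '] m none = -1 := by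
  have h1 : ¬ m < 0 := by omega
  unfold PySem.Chars.findFrom
  simp [h1, h]

theorem pvFind_bounds (cs : List Char) (m : Int) (hm : 0 ≤ m)
    (h : PySem.Chars.findFrom cs [' '] m none ≠ -1) :
    m ≤ PySem.Chars.findFrom cs [' '] m none ∧
      (PySem.Chars.findFrom cs [' '] m none).toNat < cs.length ∧
      0 ≤ PySem.Chars.findFrom cs [' '] m none := by
  by_cases hlen : m ≤ (cs.length : Int)
  · have hk : m.toNat ≤ cs.length := by omega
    have hcast : ((m.toNat : Nat) : Int) = m := by omega
    rw [← hcast] at h ⊢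
    obtain ⟨h1, h2, _⟩ := PySem.Chars.findFrom_natCast_spec cs [' '] m.toNat hk h
    refine ⟨h1, ?_, by omega⟩
    rcases h2 with ⟨t, ht⟩
    have hlen' : 0 < (List.drop (PySem.Chars.findFrom cs [' '] (↑m.toNat) none).toNat cs).length := by
      rw [← ht]; simp
    rw [List.length_drop] at hlen'
    omega
  · exact absurd (pvFind_past cs m (by omega)) h

-- B: cursor `start`, jump with name.find(' ', max(start+length+1, start)) and splice '\n'
def pvBLoop (cs : List Char) (length : Int) (result : List Char) (start : Nat) : List Char :=
  let j := PySem.Chars.findFrom cs [' ']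
    (max ((start : Int) + length + 1) (start : Int)) none
  if hj : j = -1 then result
  else
    pvBLoop cs length
      (PySem.List.slice result none (some j) ++
        '\n' :: PySem.List.slice result (some (j + 1)) none)
      (j.toNat + 1)
termination_by cs.length + 1 - start
decreasing_by
  obtain ⟨h1, h2, h3⟩ := pvFind_bounds cs
    (max ((start : Int) + length + 1) (start : Int)) (by omega) hj
  have : (start : Int) ≤ max ((start : Int) + length + 1) (start : Int) := le_max_right _ _
  omega

def break_name_alt (name : String) (length : Int) : String :=
  String.mk (pvBLoop name.toList length name.toList 0)

-- ===== PRECONDITION & SPEC =====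
def Spec_break_name (name : String) (length : Int) (out : String) : Prop := out = break_name_alt name length
instance (name : String) (length : Int) (out : String) : Decidable (Spec_break_name name length out) := by unfold Spec_break_name; infer_instance

-- ===== CLAIM (what is proved, stated in full; the proofs are below) =====
def Claim_equal_break_name : Prop := ∀ (name : String) (length : Int), Dom_break_name name length → Spec_break_name name length (break_name name length)

-- ===== LEMMAS AND PROOFS =====

theorem pvSingleton_prefix_drop (cs : List Char) (i : Nat) :
    [' '] <+: cs.drop i ↔ cs[i]? = some ' ' := by
  constructor
  · rintro ⟨t, ht⟩
    have h0 := congrArg (·[0]?) ht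
    simpa [List.getElem?_drop] using h0.symm
  · intro hi
    obtain ⟨hlt, heq⟩ := List.getElem?_eq_some_iff.mp hi
    refine ⟨cs.drop (i + 1), ?_⟩
    rw [List.drop_eq_getElem_cons hlt, heq]
    rfl

theorem pvFind_none_spec (cs : List Char) (m : Int) (hm : 0 ≤ m)
    (h : PySem.Chars.findFrom cs [' '] m none = -1) :
    ∀ (k : Nat), k < cs.length → m ≤ (k : Int) → cs[k]? ≠ some ' ' := by
  intro k hk hmk hsp
  by_cases hlen : m ≤ (cs.length : Int)
  · rw [show m = ((m.toNat : Nat) : Int) by omega] at h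
    apply (PySem.Chars.findFrom_natCast_eq_neg_one_iff cs [' '] m.toNat (by omega)).mp h
    have hmem : ' ' ∈ cs.drop m.toNat := by
      apply List.mem_of_getElem? (i := k - m.toNat)
      rw [List.getElem?_drop]
      rwa [show m.toNat + (k - m.toNat) = k by omega]
    obtain ⟨p, t, hpt⟩ := List.append_of_mem hmem
    exact ⟨p, t, by rw [hpt]; simp⟩
  · omega

theorem pvFind_some_spec (cs : List Char) (m : Int) (hm : 0 ≤ m)
    (h : PySem.Chars.findFrom cs [' '] m none ≠ -1) :
    cs[(PySem.Chars.findFrom cs [' '] m none).toNat]? = some ' ' ∧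
      ∀ (k : Nat), m ≤ (k : Int) → k < (PySem.Chars.findFrom cs [' '] m none).toNat →
        cs[k]? ≠ some ' ' := by
  have hlen : m ≤ (cs.length : Int) := by
    by_contra hc
    exact h (pvFind_past cs m (by omega))
  have hcast : ((m.toNat : Nat) : Int) = m := by omega
  rw [← hcast] at h ⊢
  obtain ⟨h1, h2, h3⟩ := PySem.Chars.findFrom_natCast_spec cs [' '] m.toNat (by omega) h
  refine ⟨(pvSingleton_prefix_drop cs _).mp h2, ?_⟩
  intro k hmk hkj hsp
  exact h3 k (by omega) hkj ((pvSingleton_prefix_drop cs k).mpr hsp)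

theorem pvALoop_done (cs : List Char) (length : Int) (i : Nat) (n : Int) (r : List Char)
    (h : cs.length ≤ i) : pvALoop cs length i n r = r := by
  rw [pvALoop]
  simp [Nat.not_lt.mpr h]

-- scanning a break-free stretch only advances i and n in lockstep
theorem pvALoop_skip (cs : List Char) (length : Int) (s : Nat) :
    ∀ (d i : Nat) (r : List Char), s ≤ i → i + d ≤ cs.length →
      (∀ k, (hk : k < cs.length) → i ≤ k → k < i + d →
        ¬(cs[k] = ' ' ∧ length < (k : Int) - (s : Int))) →
      pvALoop cs length i ((i : Int) - (s : Int)) r =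
        pvALoop cs length (i + d) (((i : Int) + (d : Int)) - (s : Int)) r := by
  intro d
  induction d with
  | zero => intro i r _ _ _; simp
  | succ d ih =>
    intro i r hsi hd hnb
    have hi : i < cs.length := by omega
    have hstep : pvALoop cs length i ((i : Int) - (s : Int)) r =
        pvALoop cs length (i + 1) ((((i : Nat) + 1 : Nat) : Int) - (s : Int)) r := by
      rw [pvALoop]
      rw [dif_pos hi]
      by_cases hsp : cs[i] = ' '
      · have hle : ¬ length < (i : Int) - (s : Int) :=
          fun hgt => hnb i hi le_rfl (by omega) ⟨hsp, hgt⟩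
        rw [if_neg (by simpa using hsp), if_neg (by simpa using hle)]
        congr 1
        push_cast; ring
      · rw [if_pos (by simpa using hsp)]
        congr 1
        push_cast; ring
    rw [hstep]
    have := ih (i + 1) r (by omega) (by omega)
      (fun k hk h1 h2 => hnb k hk (by omega) (by omega))
    rw [this]
    have e1 : i + 1 + d = i + (d + 1) := by omega
    rw [e1]
    congr 1
    push_cast; ring

theorem pvALoop_break (cs : List Char) (length : Int) (i : Nat) (n : Int) (r : List Char)
    (hi : i < cs.length) (hsp : cs[i] = ' ') (hgt : length < n) :
    pvALoop cs length i n r =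
      pvALoop cs length (i + 1) 0
        (PySem.List.slice r none (some (i : Int)) ++
          '\n' :: PySem.List.slice r (some ((i : Int) + 1)) none) := by
  rw [pvALoop]
  rw [dif_pos hi, if_neg (by simpa using hsp), if_pos (by simpa using hgt)]

theorem pvMain (cs : List Char) (length : Int) :
    ∀ (d s : Nat) (r : List Char), s ≤ cs.length → cs.length - s ≤ d →
      pvALoop cs length s 0 r = pvBLoop cs length r s := by
  intro d
  induction d with
  | zero =>
    intro s r hs hd
    have hs' : s = cs.length := by omega
    have hM0 : (0 : Int) ≤ max ((s : Int) + length + 1) (s : Int) := by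
      have := le_max_right ((s : Int) + length + 1) (s : Int); omega
    have hj : PySem.Chars.findFrom cs [' ']
        (max ((s : Int) + length + 1) (s : Int)) none = -1 := by
      by_contra hc
      obtain ⟨h1, h2, h3⟩ := pvFind_bounds cs _ hM0 hc
      have := le_max_right ((s : Int) + length + 1) (s : Int)
      omega
    rw [pvBLoop, dif_pos hj]
    exact pvALoop_done cs length s 0 r (by omega)
  | succ d ih =>
    intro s r hs hd
    have hM0 : (0 : Int) ≤ max ((s : Int) + length + 1) (s : Int) := by
      have := le_max_right ((s : Int) + length + 1) (s : Int); omega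
    by_cases hj : PySem.Chars.findFrom cs [' ']
        (max ((s : Int) + length + 1) (s : Int)) none = -1
    · rw [pvBLoop, dif_pos hj]
      have hskip := pvALoop_skip cs length s (cs.length - s) s r le_rfl (by omega)
        (by
          intro k hk h1 h2
          rintro ⟨hsp, hgt⟩
          have hMk : max ((s : Int) + length + 1) (s : Int) ≤ (k : Int) :=
            max_le (by omega) (by omega)
          exact pvFind_none_spec cs _ hM0 hj k hk hMk
            (by rw [List.getElem?_eq_getElem hk, hsp]))
      have h0 : ((s : Int) - (s : Int)) = 0 := by ring
      rw [← h0, hskip]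
      exact pvALoop_done cs length _ _ r (by omega)
    · obtain ⟨hle, hlt, hpos⟩ := pvFind_bounds cs _ hM0 hj
      obtain ⟨hsp, hmin⟩ := pvFind_some_spec cs _ hM0 hj
      set j := PySem.Chars.findFrom cs [' ']
        (max ((s : Int) + length + 1) (s : Int)) none with hjdef
      have hsle : (s : Int) ≤ j := le_trans (le_max_right _ _) hle
      have hsj : s ≤ j.toNat := by omega
      have hspace : cs[j.toNat]'hlt = ' ' := by
        have := List.getElem?_eq_getElem hlt
        rw [this] at hsp
        exact Option.some_injective _ hsp
      -- A: break-free up to j.toNat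
      have hskip := pvALoop_skip cs length s (j.toNat - s) s r le_rfl (by omega)
        (by
          intro k hk h1 h2
          rintro ⟨hspk, hgt⟩
          have hMk : max ((s : Int) + length + 1) (s : Int) ≤ (k : Int) :=
            max_le (by omega) (by omega)
          exact hmin k hMk (by omega)
            (by rw [List.getElem?_eq_getElem hk, hspk]))
      have h0 : ((s : Int) - (s : Int)) = 0 := by ring
      rw [← h0, hskip]
      have e1 : s + (j.toNat - s) = j.toNat := by omega
      rw [e1]
      have hbreak := pvALoop_break cs length j.toNat
        (((s : Int) + ((j.toNat - s : Nat) : Int)) - (s : Int)) r hlt hspace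
        (by
          have : (s : Int) + length + 1 ≤ j := le_trans (le_max_left _ _) hle
          omega)
      rw [hbreak]
      rw [pvBLoop, dif_neg (hjdef ▸ hj)]
      rw [← hjdef]
      rw [show ((j.toNat : Nat) : Int) = j by omega]
      exact ih (j.toNat + 1) _ (by omega) (by omega)

-- ===== VERDICT (by name: the statement is the Claim_ definition above) =====
theorem break_name_spec : Claim_equal_break_name := by
  intro name length _
  unfold Spec_break_name break_name break_name_alt
  exact congrArg String.mk
    (pvMain name.toList length name.toList.length 0 name.toList (Nat.zero_le _) (by omega))
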